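-- pv_equiv track=rewrite | github.com/KsardasY/BMSTU-programming | FLT/lab5.py | stack_to_str
-- ===== SOURCE A (Python) =====
-- from typing import List, Tuple, NoReturn, Set, Optional, DefaultDict, Dict, Deque
--
-- def stack_to_str(stack: Deque) -> str:
--     i = 0
--     res = list()
--     while stack:
--         char = stack.pop()
--         if i:
--             res.append(char + second_char)
--         else:
--             second_char = str(char)
--             if len(stack) == 0:
--                 res.append(second_char)
--         i = (i + 1) % 2
--     return " ".join(res[::-1])
-- ===== SOURCE B (Python) =====
-- def stack_to_str(stack):
--     # B: snapshot bottom-to-top, drain the stack (same mutation as A), walk the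
--     # snapshot FORWARD in steps of two so no final reversal is needed.
--     items = list(stack)
--     stack.clear()
--     res = []
--     idx = 0
--     if len(items) % 2:
--         res.append(str(items[0]))
--         idx = 1
--     while idx < len(items):
--         res.append(items[idx] + str(items[idx + 1]))
--         idx += 2
--     return " ".join(res)
-- ===== Notes on version B (the rewrite author's own statement) =====
-- stated objective: simpler
-- what changed: B snapshots the deque once and walks it forward in index steps of two (odd leading element first), so A's element-by-element popping with alternating i/second_char state and the final res[::-1] reversal disappear; the deque is drained as in A.
import Mathlib
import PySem

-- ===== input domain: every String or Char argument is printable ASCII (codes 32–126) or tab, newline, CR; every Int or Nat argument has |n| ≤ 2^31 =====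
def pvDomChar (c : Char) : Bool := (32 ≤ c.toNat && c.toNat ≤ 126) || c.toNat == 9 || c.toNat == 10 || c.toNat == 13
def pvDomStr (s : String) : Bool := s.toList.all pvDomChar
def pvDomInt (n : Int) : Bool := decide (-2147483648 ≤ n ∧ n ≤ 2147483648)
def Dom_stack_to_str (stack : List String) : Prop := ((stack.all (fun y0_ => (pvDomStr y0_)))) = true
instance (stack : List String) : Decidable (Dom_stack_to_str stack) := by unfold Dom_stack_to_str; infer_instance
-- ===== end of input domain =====

-- B builds the space-separated pairs in forward order (odd leading element first),
-- replacing A's pop-and-reverse loop; the equivalence is about the RETURN value —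
-- both Pythons drain the deque in place. Objective: simpler.

-- ===== PORT A =====
-- A pops from the top (end of the list); we walk stack.reverse head-first,
-- which is exactly the sequence of popped elements.
def stack_to_str_loopA : List String → Nat → String → List String → List String
  | [], _, _, res => res
  | char :: rest, i, second_char, res =>
    if i ≠ 0 then
      stack_to_str_loopA rest ((i + 1) % 2) second_char (res ++ [char ++ second_char])
    else
      -- second_char = str(char) (char is already a string)
      stack_to_str_loopA rest ((i + 1) % 2) char
        (if rest.length = 0 then res ++ [char] else res)

def stack_to_str (stack : List String) : String :=
  PySem.Str.join " " ((stack_to_str_loopA stack.reverse 0 "" []).reverse)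

-- ===== PORT B =====
-- while idx < len(items): res.append(items[idx] + str(items[idx+1])); idx += 2
-- (items[idx+1] always exists given the parity handling; getD is the in-range access)
def stack_to_str_loopB (items : List String) (idx : Nat) (res : List String) : List String :=
  if idx < items.length then
    stack_to_str_loopB items (idx + 2) (res ++ [items.getD idx "" ++ items.getD (idx + 1) ""])
  else res
termination_by items.length - idx

def stack_to_str_alt (stack : List String) : String :=
  let items := stack
  let (res, idx) :=
    if items.length % 2 = 1 then ([items.headD ""], 1) else ([], 0)
  PySem.Str.join " " (stack_to_str_loopB items idx res)

-- ===== PRECONDITION & SPEC =====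
def Spec_stack_to_str (stack : List String) (out : String) : Prop := out = stack_to_str_alt stack
instance (stack : List String) (out : String) : Decidable (Spec_stack_to_str stack out) := by unfold Spec_stack_to_str; infer_instance

-- ===== CLAIM (what is proved, stated in full; the proofs are below) =====
def Claim_equal_stack_to_str : Prop := ∀ (stack : List String), Dom_stack_to_str stack → Spec_stack_to_str stack (stack_to_str stack)

-- ===== LEMMAS AND PROOFS =====

-- the pairs as A builds them, consuming the popped sequence two at a time
def pairsRev : List String → List String
  | [] => []
  | [a] => [a]
  | a :: b :: rest => (b ++ a) :: pairsRev rest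

-- the pairs as B builds them, consuming the bottom-to-top list two at a time
def pairsF : List String → List String
  | [] => []
  | [a] => [a]
  | a :: b :: rest => (a ++ b) :: pairsF rest

theorem loopA_eq (rev : List String) : ∀ (s : String) (res : List String),
    stack_to_str_loopA rev 0 s res = res ++ pairsRev rev := by
  induction rev using pairsRev.induct with
  | case1 => intro s res; simp [stack_to_str_loopA, pairsRev]
  | case2 a => intro s res; simp [stack_to_str_loopA, pairsRev]
  | case3 a b rest ih =>
      intro s res
      simp [stack_to_str_loopA, pairsRev, ih]

theorem loopB_eq (items : List String) (idx : Nat) (h : (items.length - idx) % 2 = 0) :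
    ∀ (res : List String),
      stack_to_str_loopB items idx res = res ++ pairsF (items.drop idx) := by
  induction hn : items.length - idx using Nat.strong_induction_on generalizing idx with
  | _ n ih =>
    intro res
    by_cases hlt : idx < items.length
    · have h1 : idx + 1 < items.length := by omega
      have hdrop : items.drop idx = items[idx] :: items[idx + 1] :: items.drop (idx + 2) := by
        rw [List.drop_eq_getElem_cons hlt, List.drop_eq_getElem_cons h1]
      rw [stack_to_str_loopB, if_pos hlt,
          ih (items.length - (idx + 2)) (by omega) (idx + 2) (by omega) rfl,
          hdrop, pairsF]
      simp [List.getD_eq_getElem?_getD, hlt, h1]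
    · rw [stack_to_str_loopB, if_neg hlt, List.drop_eq_nil_of_le (by omega), pairsF]
      simp

theorem pairsF_append_pair (xs : List String) (b a : String) (h : xs.length % 2 = 0) :
    pairsF (xs ++ [b, a]) = pairsF xs ++ [b ++ a] := by
  induction xs using pairsF.induct with
  | case1 => simp [pairsF]
  | case2 x => simp at h
  | case3 x y rest ih =>
      simp only [List.length_cons] at h
      simp [pairsF, ih (by omega)]

-- B's full result list, as a function of bottom-to-top items
def specB (items : List String) : List String :=
  if items.length % 2 = 1 then items.headD "" :: pairsF (items.drop 1) else pairsF items

theorem specB_append_pair (xs : List String) (b a : String) :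
    specB (xs ++ [b, a]) = specB xs ++ [b ++ a] := by
  unfold specB
  rcases xs with _ | ⟨x, xs'⟩
  · simp [pairsF]
  · by_cases h : xs'.length % 2 = 0
    · rw [if_pos (by simp; omega), if_pos (by simp; omega)]
      simp [pairsF_append_pair xs' b a h]
    · rw [if_neg (by simp; omega), if_neg (by simp; omega)]
      simpa using pairsF_append_pair (x :: xs') b a (by simp; omega)

theorem pairsRev_reverse (rev : List String) :
    (pairsRev rev).reverse = specB rev.reverse := by
  induction rev using pairsRev.induct with
  | case1 => simp [pairsRev, specB, pairsF]
  | case2 a => simp [pairsRev, specB, pairsF]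
  | case3 a b rest ih =>
      have hrw : (a :: b :: rest).reverse = rest.reverse ++ [b, a] := by simp
      rw [hrw, specB_append_pair, pairsRev, List.reverse_cons, ih]

theorem alt_eq_specB (stack : List String) :
    stack_to_str_alt stack = PySem.Str.join " " (specB stack) := by
  rcases stack with _ | ⟨x, xs⟩
  · rw [stack_to_str_alt]; simp [specB, stack_to_str_loopB, pairsF]
  · by_cases h : xs.length % 2 = 0
    · have h1 : (xs.length + 1) % 2 = 1 := by omega
      simp [stack_to_str_alt, specB, h1, loopB_eq (x :: xs) 1 (by simp; omega)]
    · have h1 : ¬ (xs.length + 1) % 2 = 1 := by omega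
      simp [stack_to_str_alt, specB, h1, loopB_eq (x :: xs) 0 (by simp; omega)]

-- ===== VERDICT (by name: the statement is the Claim_ definition above) =====
theorem stack_to_str_spec : Claim_equal_stack_to_str := by
  intro stack _
  show stack_to_str stack = stack_to_str_alt stack
  rw [stack_to_str, loopA_eq, alt_eq_specB]
  have := pairsRev_reverse stack.reverse
  rw [List.reverse_reverse] at this
  simp [this]
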